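-- pv_equiv track=rewrite | github.com/cbwinslow/jcsnotfunny | agents/content_analyst_agent.py | _categorize_topics
-- ===== SOURCE A (Python) =====
-- from typing import Dict, List, Any, Optional, Tuple
--
-- def _categorize_topics(topics: List[str]) -> Dict[str, List[str]]:
--     """Categorize topics into broad categories."""
--     categories: Dict[str, List[str]] = {
--         'technology': [],
--         'business': [],
--         'entertainment': [],
--         'sports': [],
--         'politics': [],
--         'health': [],
--         'science': [],
--         'education': [],
--         'lifestyle': [],
--         'other': []
--     }
--
--     tech_keywords = {'tech', 'software', 'hardware', 'ai', 'machine', 'learning', 'program', 'code', 'computer'}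
--     business_keywords = {'business', 'company', 'startup', 'market', 'invest', 'money', 'finance', 'economy'}
--     entertainment_keywords = {'movie', 'film', 'tv', 'show', 'actor', 'celebrity', 'music', 'hollywood'}
--
--     for topic in topics:
--         topic_words = set(topic.split())
--
--         if topic_words & tech_keywords:
--             categories['technology'].append(topic)
--         elif topic_words & business_keywords:
--             categories['business'].append(topic)
--         elif topic_words & entertainment_keywords:
--             categories['entertainment'].append(topic)
--         else:
--             categories['other'].append(topic)
--
--     # Remove empty categories
--     return {k: v for k, v in categories.items() if v}
-- ===== SOURCE B (Python) =====
-- def _categorize_topics(topics):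
--     """Categorize topics into broad categories."""
--     index = {}
--     for rank, words in enumerate((
--         ('tech', 'software', 'hardware', 'ai', 'machine', 'learning', 'program', 'code', 'computer'),
--         ('business', 'company', 'startup', 'market', 'invest', 'money', 'finance', 'economy'),
--         ('movie', 'film', 'tv', 'show', 'actor', 'celebrity', 'music', 'hollywood'),
--     )):
--         for w in words:
--             index[w] = rank
--     names = ('technology', 'business', 'entertainment', 'other')
--     buckets = ([], [], [], [])
--     for topic in topics:
--         best = None
--         for w in topic.split():
--             r = index.get(w)
--             if r is not None and (best is None or r < best):
--                 best = r
--         buckets[3 if best is None else best].append(topic)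
--     return {n: b for n, b in zip(names, buckets) if b}
-- ===== Notes on version B (the rewrite author's own statement) =====
-- stated objective: faster
-- what changed: Replaces the three per-topic set constructions/intersections and the elif chain by one merged keyword->priority dict built once; each topic's words are scanned in a single pass keeping the minimum priority, and the topic goes to the bucket of that minimum (or 'other'), relying on the keyword sets being pairwise disjoint.
import Mathlib
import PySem

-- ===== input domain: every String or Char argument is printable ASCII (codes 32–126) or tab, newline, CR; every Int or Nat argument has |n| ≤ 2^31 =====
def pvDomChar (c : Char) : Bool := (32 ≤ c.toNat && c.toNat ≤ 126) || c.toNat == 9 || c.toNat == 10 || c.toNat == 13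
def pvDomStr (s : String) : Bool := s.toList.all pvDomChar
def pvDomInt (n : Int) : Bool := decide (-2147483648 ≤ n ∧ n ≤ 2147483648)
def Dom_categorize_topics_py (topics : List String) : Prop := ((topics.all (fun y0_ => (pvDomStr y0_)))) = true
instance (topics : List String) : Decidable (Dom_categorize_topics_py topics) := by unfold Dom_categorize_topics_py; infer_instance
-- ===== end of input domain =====

-- B builds one merged keyword->priority dict and classifies each topic by the minimum
-- priority among its words (constant-factor faster, measured; return-value equivalence).

-- ===== PORT A =====
def pvTechKeywords : PySem.Set String :=
  PySem.Set.ofList ["tech", "software", "hardware", "ai", "machine", "learning", "program", "code", "computer"]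
def pvBusinessKeywords : PySem.Set String :=
  PySem.Set.ofList ["business", "company", "startup", "market", "invest", "money", "finance", "economy"]
def pvEntertainmentKeywords : PySem.Set String :=
  PySem.Set.ofList ["movie", "film", "tv", "show", "actor", "celebrity", "music", "hollywood"]

def categorize_topics_py (topics : List String) : List (String × List String) :=
  let categories : PySem.Dict String (List String) :=
    PySem.Dict.ofList [("technology", []), ("business", []), ("entertainment", []), ("sports", []),
                       ("politics", []), ("health", []), ("science", []), ("education", []),
                       ("lifestyle", []), ("other", [])]
  let categories := topics.foldl (fun cats topic =>
    let topic_words : PySem.Set String := PySem.Set.ofList (PySem.Str.split₀ topic)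
    if PySem.Set.inter topic_words pvTechKeywords ≠ [] then
      cats.modify "technology" [] (· ++ [topic])
    else if PySem.Set.inter topic_words pvBusinessKeywords ≠ [] then
      cats.modify "business" [] (· ++ [topic])
    else if PySem.Set.inter topic_words pvEntertainmentKeywords ≠ [] then
      cats.modify "entertainment" [] (· ++ [topic])
    else
      cats.modify "other" [] (· ++ [topic])) categories
  categories.items.filter (fun p => !p.2.isEmpty)

-- ===== PORT B =====
def pvGroups : List (List String × Int) :=
  [(["tech", "software", "hardware", "ai", "machine", "learning", "program", "code", "computer"], 0),
   (["business", "company", "startup", "market", "invest", "money", "finance", "economy"], 1),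
   (["movie", "film", "tv", "show", "actor", "celebrity", "music", "hollywood"], 2)]

def pvKeywordIndex : PySem.Dict String Int :=
  pvGroups.foldl (fun d g => g.1.foldl (fun d w => d.insert w g.2) d) PySem.Dict.empty

def pvBest (topic : String) : Option Int :=
  (PySem.Str.split₀ topic).foldl (fun best w =>
    match pvKeywordIndex.get? w with
    | none => best
    | some r =>
      match best with
      | none => some r
      | some b => if r < b then some r else some b) none

def categorize_topics_py_alt (topics : List String) : List (String × List String) :=
  let buckets := topics.foldl (fun (bk : List String × List String × List String × List String) topic =>
    match pvBest topic with
    | none => (bk.1, bk.2.1, bk.2.2.1, bk.2.2.2 ++ [topic])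
    | some r =>
      if r = 0 then (bk.1 ++ [topic], bk.2.1, bk.2.2.1, bk.2.2.2)
      else if r = 1 then (bk.1, bk.2.1 ++ [topic], bk.2.2.1, bk.2.2.2)
      else (bk.1, bk.2.1, bk.2.2.1 ++ [topic], bk.2.2.2)) ([], [], [], [])
  ([("technology", buckets.1), ("business", buckets.2.1),
    ("entertainment", buckets.2.2.1), ("other", buckets.2.2.2)]).filter (fun p => !p.2.isEmpty)

-- ===== PRECONDITION & SPEC =====
def Spec_categorize_topics_py (topics : List String) (out : List (String × List String)) : Prop := out = categorize_topics_py_alt topics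
instance (topics : List String) (out : List (String × List String)) : Decidable (Spec_categorize_topics_py topics out) := by unfold Spec_categorize_topics_py; infer_instance

-- ===== CLAIM (what is proved, stated in full; the proofs are below) =====
def Claim_equal_categorize_topics_py : Prop := ∀ (topics : List String), Dom_categorize_topics_py topics → Spec_categorize_topics_py topics (categorize_topics_py topics)

-- ===== LEMMAS AND PROOFS =====

def pvTechL : List String := ["tech", "software", "hardware", "ai", "machine", "learning", "program", "code", "computer"]
def pvBusL : List String := ["business", "company", "startup", "market", "invest", "money", "finance", "economy"]
def pvEntL : List String := ["movie", "film", "tv", "show", "actor", "celebrity", "music", "hollywood"]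

-- "some word of ws lies in L"
def pvHasKw (L ws : List String) : Bool := ws.any (fun x => L.contains x)

theorem pvHasKw_cons (L : List String) (w : String) (t : List String) :
    pvHasKw L (w :: t) = (L.contains w || pvHasKw L t) := by
  simp [pvHasKw]

-- the keyword groups are pairwise disjoint (checked on the literals)
theorem pv_disj_tech : ∀ w ∈ pvTechL, w ∉ pvBusL ∧ w ∉ pvEntL := by decide
theorem pv_disj_bus : ∀ w ∈ pvBusL, w ∉ pvEntL := by decide

theorem pv_get?_insert_list (l : List String) (v : Int) (d : PySem.Dict String Int) (x : String) :
    (l.foldl (fun d w => d.insert w v) d).get? x = if x ∈ l then some v else d.get? x := by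
  induction l generalizing d with
  | nil => simp
  | cons h t ih =>
    simp only [List.foldl_cons, ih, PySem.Dict.get?_insert, List.mem_cons]
    split_ifs <;> tauto

theorem pv_idx_get (x : String) : pvKeywordIndex.get? x =
    if x ∈ pvEntL then some 2 else if x ∈ pvBusL then some 1 else if x ∈ pvTechL then some 0 else none := by
  have h : pvKeywordIndex =
      pvEntL.foldl (fun d w => d.insert w 2)
        (pvBusL.foldl (fun d w => d.insert w 1)
          (pvTechL.foldl (fun d w => d.insert w 0) PySem.Dict.empty)) := rfl
  rw [h, pv_get?_insert_list, pv_get?_insert_list, pv_get?_insert_list, PySem.Dict.get?_empty]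

def pvOmin (a b : Option Int) : Option Int :=
  match a, b with
  | none, b => b
  | some x, none => some x
  | some x, some y => some (min x y)

theorem pvOmin_none_left (b : Option Int) : pvOmin none b = b := rfl

theorem pvOmin_none_right (a : Option Int) : pvOmin a none = a := by cases a <;> rfl

theorem pvOmin_assoc (a b c : Option Int) : pvOmin (pvOmin a b) c = pvOmin a (pvOmin b c) := by
  cases a <;> cases b <;> cases c <;> simp [pvOmin, min_assoc]

theorem pv_step_eq (best : Option Int) (w : String) :
    (match pvKeywordIndex.get? w with
     | none => best
     | some r => match best with
       | none => some r
       | some b => if r < b then some r else some b) = pvOmin best (pvKeywordIndex.get? w) := by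
  cases h : pvKeywordIndex.get? w with
  | none => cases best <;> rfl
  | some r =>
    cases best with
    | none => rfl
    | some b =>
      show (if r < b then some r else some b) = some (min b r)
      split_ifs with hrb <;> (congr 1; omega)

theorem pv_foldl_omin (g : String → Option Int) (ws : List String) (acc : Option Int) :
    ws.foldl (fun a w => pvOmin a (g w)) acc = pvOmin acc (ws.foldl (fun a w => pvOmin a (g w)) none) := by
  induction ws generalizing acc with
  | nil => simp [pvOmin_none_right]
  | cons w t ih =>
    simp only [List.foldl_cons]
    rw [ih (pvOmin acc (g w)), ih (pvOmin none (g w)), pvOmin_none_left, pvOmin_assoc]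

theorem pv_pbest_char (ws : List String) :
    ws.foldl (fun a w => pvOmin a (pvKeywordIndex.get? w)) none =
      if pvHasKw pvTechL ws then some 0
      else if pvHasKw pvBusL ws then some 1
      else if pvHasKw pvEntL ws then some 2 else none := by
  induction ws with
  | nil => simp [pvHasKw]
  | cons w t ih =>
    simp only [List.foldl_cons]
    rw [pv_foldl_omin, pvOmin_none_left, ih, pv_idx_get w]
    have hd1 := pv_disj_tech w
    have hd2 := pv_disj_bus w
    simp only [pvHasKw_cons]
    by_cases h1 : w ∈ pvTechL <;> by_cases h2 : w ∈ pvBusL <;> by_cases h3 : w ∈ pvEntL <;>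
      simp_all <;>
      split_ifs <;> simp [pvOmin]

theorem pv_pvBest_char (topic : String) :
    pvBest topic =
      if pvHasKw pvTechL (PySem.Str.split₀ topic) then some 0
      else if pvHasKw pvBusL (PySem.Str.split₀ topic) then some 1
      else if pvHasKw pvEntL (PySem.Str.split₀ topic) then some 2 else none := by
  unfold pvBest
  rw [show (fun (best : Option Int) (w : String) =>
        (match pvKeywordIndex.get? w with
         | none => best
         | some r => match best with
           | none => some r
           | some b => if r < b then some r else some b)) = (fun a w => pvOmin a (pvKeywordIndex.get? w))
      from funext fun a => funext fun w => pv_step_eq a w]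
  exact pv_pbest_char _

theorem pv_inter_ne_iff (ws L : List String) :
    PySem.Set.inter (PySem.Set.ofList ws) L ≠ [] ↔ pvHasKw L ws = true := by
  rw [Ne, List.eq_nil_iff_forall_not_mem]
  simp [PySem.Set.mem_inter, PySem.Set.mem_ofList, pvHasKw, List.any_eq_true]

def pvDten (t b e o : List String) : PySem.Dict String (List String) :=
  PySem.Dict.mk [("technology", t), ("business", b), ("entertainment", e), ("sports", []),
                 ("politics", []), ("health", []), ("science", []), ("education", []),
                 ("lifestyle", []), ("other", o)]

theorem pv_mod_tech (t b e o : List String) (s : String) :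
    (pvDten t b e o).modify "technology" [] (· ++ [s]) = pvDten (t ++ [s]) b e o := by
  simp [pvDten, PySem.Dict.modify, PySem.Dict.contains, PySem.Dict.get?, PySem.Dict.insert, PySem.Dict.getD]

theorem pv_mod_bus (t b e o : List String) (s : String) :
    (pvDten t b e o).modify "business" [] (· ++ [s]) = pvDten t (b ++ [s]) e o := by
  simp [pvDten, PySem.Dict.modify, PySem.Dict.contains, PySem.Dict.get?, PySem.Dict.insert, PySem.Dict.getD]

theorem pv_mod_ent (t b e o : List String) (s : String) :
    (pvDten t b e o).modify "entertainment" [] (· ++ [s]) = pvDten t b (e ++ [s]) o := by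
  simp [pvDten, PySem.Dict.modify, PySem.Dict.contains, PySem.Dict.get?, PySem.Dict.insert, PySem.Dict.getD]

theorem pv_mod_other (t b e o : List String) (s : String) :
    (pvDten t b e o).modify "other" [] (· ++ [s]) = pvDten t b e (o ++ [s]) := by
  simp [pvDten, PySem.Dict.modify, PySem.Dict.contains, PySem.Dict.get?, PySem.Dict.insert, PySem.Dict.getD]

def pvAstep (cats : PySem.Dict String (List String)) (topic : String) : PySem.Dict String (List String) :=
  let topic_words : PySem.Set String := PySem.Set.ofList (PySem.Str.split₀ topic)
  if PySem.Set.inter topic_words pvTechKeywords ≠ [] then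
    cats.modify "technology" [] (· ++ [topic])
  else if PySem.Set.inter topic_words pvBusinessKeywords ≠ [] then
    cats.modify "business" [] (· ++ [topic])
  else if PySem.Set.inter topic_words pvEntertainmentKeywords ≠ [] then
    cats.modify "entertainment" [] (· ++ [topic])
  else
    cats.modify "other" [] (· ++ [topic])

def pvBstep (bk : List String × List String × List String × List String) (topic : String) :
    List String × List String × List String × List String :=
  match pvBest topic with
  | none => (bk.1, bk.2.1, bk.2.2.1, bk.2.2.2 ++ [topic])
  | some r =>
    if r = 0 then (bk.1 ++ [topic], bk.2.1, bk.2.2.1, bk.2.2.2)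
    else if r = 1 then (bk.1, bk.2.1 ++ [topic], bk.2.2.1, bk.2.2.2)
    else (bk.1, bk.2.1, bk.2.2.1 ++ [topic], bk.2.2.2)

theorem pv_set_tech : pvTechKeywords = pvTechL := by decide
theorem pv_set_bus : pvBusinessKeywords = pvBusL := by decide
theorem pv_set_ent : pvEntertainmentKeywords = pvEntL := by decide

theorem pv_step_corr (t b e o : List String) (topic : String) :
    pvAstep (pvDten t b e o) topic =
      (fun p => pvDten p.1 p.2.1 p.2.2.1 p.2.2.2) (pvBstep (t, b, e, o) topic) := by
  unfold pvAstep pvBstep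
  dsimp only
  rw [pv_pvBest_char topic, pv_set_tech, pv_set_bus, pv_set_ent]
  by_cases h1 : pvHasKw pvTechL (PySem.Str.split₀ topic) = true
  · rw [if_pos ((pv_inter_ne_iff _ _).mpr h1), if_pos h1]
    simp [pv_mod_tech]
  · rw [if_neg (fun hc => h1 ((pv_inter_ne_iff _ _).mp hc)), if_neg (fun hc => h1 hc)]
    by_cases h2 : pvHasKw pvBusL (PySem.Str.split₀ topic) = true
    · rw [if_pos ((pv_inter_ne_iff _ _).mpr h2), if_pos h2]
      simp [pv_mod_bus]
    · rw [if_neg (fun hc => h2 ((pv_inter_ne_iff _ _).mp hc)), if_neg (fun hc => h2 hc)]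
      by_cases h3 : pvHasKw pvEntL (PySem.Str.split₀ topic) = true
      · rw [if_pos ((pv_inter_ne_iff _ _).mpr h3), if_pos h3]
        simp [pv_mod_ent]
      · rw [if_neg (fun hc => h3 ((pv_inter_ne_iff _ _).mp hc)), if_neg (fun hc => h3 hc)]
        simp [pv_mod_other]

theorem pv_loop (topics : List String) : ∀ t b e o : List String,
    topics.foldl pvAstep (pvDten t b e o) =
      (fun p => pvDten p.1 p.2.1 p.2.2.1 p.2.2.2) (topics.foldl pvBstep (t, b, e, o)) := by
  induction topics with
  | nil => intro t b e o; rfl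
  | cons topic rest ih =>
    intro t b e o
    simp only [List.foldl_cons]
    rw [pv_step_corr]
    exact ih _ _ _ _

-- ===== VERDICT (by name: the statement is the Claim_ definition above) =====
theorem categorize_topics_py_spec : Claim_equal_categorize_topics_py := by
  unfold Claim_equal_categorize_topics_py Spec_categorize_topics_py
  intro topics _
  show categorize_topics_py topics = categorize_topics_py_alt topics
  unfold categorize_topics_py categorize_topics_py_alt
  dsimp only
  have hbase : PySem.Dict.ofList
      ([("technology", []), ("business", []), ("entertainment", []), ("sports", []),
        ("politics", []), ("health", []), ("science", []), ("education", []),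
        ("lifestyle", []), ("other", [])] : List (String × List String)) = pvDten [] [] [] [] := by decide
  rw [hbase]
  rw [show (fun (cats : PySem.Dict String (List String)) (topic : String) =>
        let topic_words : PySem.Set String := PySem.Set.ofList (PySem.Str.split₀ topic)
        if PySem.Set.inter topic_words pvTechKeywords ≠ [] then
          cats.modify "technology" [] (· ++ [topic])
        else if PySem.Set.inter topic_words pvBusinessKeywords ≠ [] then
          cats.modify "business" [] (· ++ [topic])
        else if PySem.Set.inter topic_words pvEntertainmentKeywords ≠ [] then
          cats.modify "entertainment" [] (· ++ [topic])
        else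
          cats.modify "other" [] (· ++ [topic])) = pvAstep from rfl]
  rw [show (fun (bk : List String × List String × List String × List String) (topic : String) =>
        match pvBest topic with
        | none => (bk.1, bk.2.1, bk.2.2.1, bk.2.2.2 ++ [topic])
        | some r =>
          if r = 0 then (bk.1 ++ [topic], bk.2.1, bk.2.2.1, bk.2.2.2)
          else if r = 1 then (bk.1, bk.2.1 ++ [topic], bk.2.2.1, bk.2.2.2)
          else (bk.1, bk.2.1, bk.2.2.1 ++ [topic], bk.2.2.2)) = pvBstep from rfl]
  rw [pv_loop topics [] [] [] []]
  rcases topics.foldl pvBstep ([], [], [], []) with ⟨t, b, e, o⟩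
  simp [pvDten, List.filter]
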